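-- pv_equiv track=rewrite | github.com/achen272/csc201spring2016 | Chen-Program04.py | simpleExpressionIsValid
-- ===== SOURCE A (Python) =====
-- def simpleExpressionIsValid(expr):
--         opers = set(["+", "-", "*", "/"])
--         for i in opers:
--             if i in expr:
--                 index = expr.find(i)
--                 num1 = expr[0:index]
--                 num2 = expr[index+1:]
--                 if num1.isdigit() and num2.isdigit():
--                     return True
--                 else:
--                     return False
--                 return expr
-- ===== SOURCE B (Python) =====
-- def simpleExpressionIsValid(expr):
--     for i, c in enumerate(expr):
--         if c in "+-*/":
--             return expr[:i].isdigit() and expr[i+1:].isdigit()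
--     return None
-- ===== Notes on version B (the rewrite author's own statement) =====
-- stated objective: simpler
-- what changed: Instead of iterating over the four operators and calling str.find/substring search per operator, B makes one left-to-right scan of the characters with enumerate, splits at the first operator position found, and validates the two slices with isdigit; no operator found returns None.
import Mathlib
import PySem

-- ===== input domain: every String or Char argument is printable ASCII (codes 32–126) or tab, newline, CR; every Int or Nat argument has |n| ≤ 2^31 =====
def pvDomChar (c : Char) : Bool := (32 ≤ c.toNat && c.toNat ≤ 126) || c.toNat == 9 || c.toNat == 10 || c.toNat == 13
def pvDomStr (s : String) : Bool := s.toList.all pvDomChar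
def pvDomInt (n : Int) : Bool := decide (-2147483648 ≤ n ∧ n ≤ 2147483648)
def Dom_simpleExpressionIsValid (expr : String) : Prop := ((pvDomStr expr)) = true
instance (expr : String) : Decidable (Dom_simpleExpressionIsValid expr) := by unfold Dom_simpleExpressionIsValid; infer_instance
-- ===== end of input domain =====

-- B replaces A's per-operator substring searches (loop over set("+-*/") with find) by one
-- left-to-right enumerate scan splitting at the first operator position; objective: simpler.
-- Note: Python iterates over a set (hash order); the port iterates in insertion order — the
-- returned value is the same for any order (the equivalence proof covers each operator branch).

-- ===== PORT A =====
def pvAloop (cs : List Char) : List String → Option Bool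
  | [] => none
  | i :: rest =>
    if PySem.Chars.isIn i.toList cs then
      let index := PySem.Chars.find cs i.toList
      some (PySem.Chars.strIsdigit (PySem.List.slice cs (some 0) (some index)) &&
            PySem.Chars.strIsdigit (PySem.List.slice cs (some (index + 1)) none))
    else pvAloop cs rest

def simpleExpressionIsValid (expr : String) : Option Bool :=
  pvAloop expr.toList (PySem.Set.ofList ["+", "-", "*", "/"])

-- ===== PORT B =====
def pvBloop (full : List Char) : Nat → List Char → Option Bool
  | _, [] => none
  | i, c :: rest =>
    if PySem.Chars.isIn [c] "+-*/".toList then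
      some (PySem.Chars.strIsdigit (PySem.List.slice full none (some (i : Int))) &&
            PySem.Chars.strIsdigit (PySem.List.slice full (some ((i : Int) + 1)) none))
    else pvBloop full (i + 1) rest

def simpleExpressionIsValid_alt (expr : String) : Option Bool :=
  pvBloop expr.toList 0 expr.toList

-- ===== PRECONDITION & SPEC =====
def Spec_simpleExpressionIsValid (expr : String) (out : Option Bool) : Prop := out = simpleExpressionIsValid_alt expr
instance (expr : String) (out : Option Bool) : Decidable (Spec_simpleExpressionIsValid expr out) := by unfold Spec_simpleExpressionIsValid; infer_instance

-- ===== CLAIM (what is proved, stated in full; the proofs are below) =====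
def Claim_equal_simpleExpressionIsValid : Prop := ∀ (expr : String), Dom_simpleExpressionIsValid expr → Spec_simpleExpressionIsValid expr (simpleExpressionIsValid expr)

-- ===== LEMMAS AND PROOFS =====

def pvOps : List Char := ['+', '-', '*', '/']

def pvFirstOpIdx : List Char → Option Nat
  | [] => none
  | c :: rest => if c ∈ pvOps then some 0 else (pvFirstOpIdx rest).map (· + 1)

lemma pv_singleton_prefix (c : Char) (l : List Char) : [c] <+: l ↔ l.head? = some c := by
  cases l with
  | nil => simp
  | cons x xs =>
    constructor
    · rintro ⟨t, ht⟩; simp at ht; simp [ht.1]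
    · intro h; simp at h; exact ⟨xs, by simp [h]⟩

lemma pv_isIn_singleton (c : Char) (l : List Char) :
    PySem.Chars.isIn [c] l = true ↔ c ∈ l := by
  rw [PySem.Chars.isIn_iff_infix]; exact List.singleton_infix_iff c l

lemma pv_op_not_digit {c : Char} (hc : c ∈ pvOps) : PySem.Chars.isdigit c = false := by
  simp only [pvOps, List.mem_cons, List.not_mem_nil, or_false] at hc
  rcases hc with rfl | rfl | rfl | rfl <;> decide

lemma pv_isdigit_false_of_mem {c : Char} {l : List Char} (hm : c ∈ l)
    (hc : PySem.Chars.isdigit c = false) : PySem.Chars.strIsdigit l = false := by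
  have : l.all PySem.Chars.isdigit = false := by
    rw [List.all_eq_false]
    exact ⟨c, hm, by simp [hc]⟩
  simp [PySem.Chars.strIsdigit, this]

lemma pvFirstOpIdx_none {cs : List Char} (h : pvFirstOpIdx cs = none) :
    ∀ c ∈ cs, c ∉ pvOps := by
  induction cs with
  | nil => simp
  | cons x xs ih =>
    simp only [pvFirstOpIdx] at h
    split_ifs at h with hx
    rw [Option.map_eq_none_iff] at h
    intro c hc
    rcases List.mem_cons.mp hc with rfl | hc'
    · exact hx
    · exact ih h c hc'

lemma pvFirstOpIdx_spec {cs : List Char} {j : Nat} (h : pvFirstOpIdx cs = some j) :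
    (∃ c, cs[j]? = some c ∧ c ∈ pvOps) ∧ ∀ i < j, ∀ c, cs[i]? = some c → c ∉ pvOps := by
  induction cs generalizing j with
  | nil => simp [pvFirstOpIdx] at h
  | cons x xs ih =>
    simp only [pvFirstOpIdx] at h
    split_ifs at h with hx
    · simp only [Option.some.injEq] at h
      subst h
      exact ⟨⟨x, by simp, hx⟩, by omega⟩
    · rcases Option.map_eq_some_iff.mp h with ⟨j', hj', rfl⟩
      obtain ⟨⟨c, hc, hcop⟩, hmin⟩ := ih hj'
      refine ⟨⟨c, by simp only [List.getElem?_cons_succ]; exact hc, hcop⟩, ?_⟩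
      intro i hi c' hc'
      cases i with
      | zero => simp only [List.getElem?_cons_zero, Option.some.injEq] at hc'; subst hc'; exact hx
      | succ i' =>
        simp only [List.getElem?_cons_succ] at hc'
        exact hmin i' (by omega) c' hc'

-- B's loop computes: split at the first operator index of the remaining suffix, offset by i.
lemma pvBloop_eq (full : List Char) (cs : List Char) (i : Nat) :
    pvBloop full i cs =
      match pvFirstOpIdx cs with
      | none => none
      | some k => some (PySem.Chars.strIsdigit (full.take (i + k)) &&
                        PySem.Chars.strIsdigit (full.drop (i + k + 1))) := by
  induction cs generalizing i with
  | nil => simp [pvBloop, pvFirstOpIdx]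
  | cons c rest ih =>
    simp only [pvBloop, pvFirstOpIdx]
    have hops : ("+-*/").toList = pvOps := by decide
    by_cases hc : c ∈ pvOps
    · rw [if_pos (by rw [hops]; exact (pv_isIn_singleton c pvOps).mpr hc), if_pos hc]
      have h1 : PySem.List.slice full none (some (i : Int)) = full.take i :=
        PySem.List.slice_to_natCast full i
      have h2 : PySem.List.slice full (some ((i : Int) + 1)) none = full.drop (i + 1) := by
        have : ((i : Int) + 1) = ((i + 1 : Nat) : Int) := by push_cast; ring
        rw [this]; exact PySem.List.slice_from_natCast full (i + 1)
      simp [h1, h2]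
    · rw [if_neg (by rw [hops]; simp [pv_isIn_singleton, hc]), if_neg hc, ih]
      cases hF : pvFirstOpIdx rest with
      | none => simp
      | some k =>
        simp only [Option.map_some]
        have e1 : i + (k + 1) = i + 1 + k := by omega
        rw [e1]

-- A's operator branch: for any operator char present in cs, splitting at its first
-- occurrence gives the same answer as splitting at the first operator position overall.
lemma pvA_branch_eq {cs : List Char} {c : Char} {j : Nat} (hcop : c ∈ pvOps)
    (h : PySem.Chars.isIn [c] cs = true) (hj : pvFirstOpIdx cs = some j) :
    (PySem.Chars.strIsdigit (PySem.List.slice cs (some 0) (some (PySem.Chars.find cs [c]))) &&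
     PySem.Chars.strIsdigit (PySem.List.slice cs (some (PySem.Chars.find cs [c] + 1)) none)) =
    (PySem.Chars.strIsdigit (cs.take j) && PySem.Chars.strIsdigit (cs.drop (j + 1))) := by
  have hinf : [c] <:+: cs := (PySem.Chars.isIn_iff_infix [c] cs).mp h
  have hnn : 0 ≤ PySem.Chars.find cs [c] := (PySem.Chars.find_nonneg_iff cs [c]).mpr hinf
  obtain ⟨hpre, hmin⟩ := PySem.Chars.find_spec hnn
  set k := (PySem.Chars.find cs [c]).toNat with hk
  have hck : cs[k]? = some c := by
    rw [← List.head?_drop]; exact (pv_singleton_prefix c _).mp hpre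
  obtain ⟨⟨c0, hc0, hc0op⟩, hjmin⟩ := pvFirstOpIdx_spec hj
  have hjk : j ≤ k := by
    by_contra hlt
    exact (hjmin k (by omega) c hck) hcop
  have hfind : PySem.Chars.find cs [c] = (k : Int) := by omega
  have hs1 : PySem.List.slice cs (some 0) (some (PySem.Chars.find cs [c])) = cs.take k := by
    rw [hfind]
    simp [PySem.List.slice_to_natCast]
  have hs2 : PySem.List.slice cs (some (PySem.Chars.find cs [c] + 1)) none = cs.drop (k + 1) := by
    rw [hfind]
    have : ((k : Int) + 1) = ((k + 1 : Nat) : Int) := by push_cast; ring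
    rw [this]; exact PySem.List.slice_from_natCast cs (k + 1)
  rw [hs1, hs2]
  rcases Nat.eq_or_lt_of_le hjk with rfl | hlt
  · rfl
  · -- j < k: a second operator char exists, both sides are false
    have hd1 : PySem.Chars.strIsdigit (cs.take k) = false := by
      have : (cs.take k)[j]? = some c0 := by rw [List.getElem?_take_of_lt hlt]; exact hc0
      exact pv_isdigit_false_of_mem (List.mem_of_getElem? this) (pv_op_not_digit hc0op)
    have hd2 : PySem.Chars.strIsdigit (cs.drop (j + 1)) = false := by
      have : (cs.drop (j + 1))[k - (j + 1)]? = some c := by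
        rw [List.getElem?_drop]
        have : j + 1 + (k - (j + 1)) = k := by omega
        rw [this]; exact hck
      exact pv_isdigit_false_of_mem (List.mem_of_getElem? this) (pv_op_not_digit hcop)
    simp [hd1, hd2]

lemma pv_main (cs : List Char) :
    pvAloop cs (PySem.Set.ofList ["+", "-", "*", "/"]) = pvBloop cs 0 cs := by
  have hset : PySem.Set.ofList ["+", "-", "*", "/"] = ["+", "-", "*", "/"] := by decide
  rw [hset, pvBloop_eq]
  simp only [pvAloop]
  have t1 : ("+" : String).toList = ['+'] := by decide
  have t2 : ("-" : String).toList = ['-'] := by decide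
  have t3 : ("*" : String).toList = ['*'] := by decide
  have t4 : ("/" : String).toList = ['/'] := by decide
  rw [t1, t2, t3, t4]
  cases hF : pvFirstOpIdx cs with
  | none =>
    have hno := pvFirstOpIdx_none hF
    have h1 : PySem.Chars.isIn ['+'] cs = false := by
      by_contra h; simp only [Bool.not_eq_false, pv_isIn_singleton] at h
      exact hno _ h (by decide)
    have h2 : PySem.Chars.isIn ['-'] cs = false := by
      by_contra h; simp only [Bool.not_eq_false, pv_isIn_singleton] at h
      exact hno _ h (by decide)
    have h3 : PySem.Chars.isIn ['*'] cs = false := by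
      by_contra h; simp only [Bool.not_eq_false, pv_isIn_singleton] at h
      exact hno _ h (by decide)
    have h4 : PySem.Chars.isIn ['/'] cs = false := by
      by_contra h; simp only [Bool.not_eq_false, pv_isIn_singleton] at h
      exact hno _ h (by decide)
    simp [h1, h2, h3, h4]
  | some j =>
    simp only [Nat.zero_add]
    split_ifs with h1 h2 h3 h4
    · exact congrArg some (pvA_branch_eq (by decide) h1 hF)
    · exact congrArg some (pvA_branch_eq (by decide) h2 hF)
    · exact congrArg some (pvA_branch_eq (by decide) h3 hF)
    · exact congrArg some (pvA_branch_eq (by decide) h4 hF)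
    · exfalso
      obtain ⟨⟨c, hc, hcop⟩, _⟩ := pvFirstOpIdx_spec hF
      have hmem : c ∈ cs := List.mem_of_getElem? hc
      have hin : PySem.Chars.isIn [c] cs = true := (pv_isIn_singleton c cs).mpr hmem
      simp only [pvOps, List.mem_cons, List.not_mem_nil, or_false] at hcop
      rcases hcop with rfl | rfl | rfl | rfl
      · exact h1 hin
      · exact h2 hin
      · exact h3 hin
      · exact h4 hin

-- ===== VERDICT (by name: the statement is the Claim_ definition above) =====
theorem simpleExpressionIsValid_spec : Claim_equal_simpleExpressionIsValid := by
  intro expr _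
  unfold Spec_simpleExpressionIsValid simpleExpressionIsValid simpleExpressionIsValid_alt
  exact pv_main expr.toList
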